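-- pv_equiv track=rewrite | github.com/ThierryBeaulieu/CPI_AUT_23 | Programmation/pre-CQI-problem-set/hamming/decode.py | convertMatrixToStringsOfBinary
-- ===== SOURCE A (Python) =====
-- def convertMatrixToStringsOfBinary(binaryMatrix):
--     if len(binaryMatrix) % 2 != 0:
--         raise Exception("Error, impossible to convert binary to ascii")
--
--     asciiChars = []
--     asciiChar = ""
--     i = 0
--     while i < len(binaryMatrix):
--         for binaryValue in binaryMatrix[i]:
--             asciiChar = asciiChar + str(int(binaryValue))
--         if i % 2 == 1:
--             asciiChars.append(asciiChar)
--             asciiChar = ""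
--         i += 1
--
--     return asciiChars
-- ===== SOURCE B (Python) =====
-- def convertMatrixToStringsOfBinary(binaryMatrix):
--     if len(binaryMatrix) % 2 != 0:
--         raise Exception("Error, impossible to convert binary to ascii")
--     asciiChars = []
--     for i in range(0, len(binaryMatrix), 2):
--         asciiChars.append(''.join(str(int(b)) for b in binaryMatrix[i] + binaryMatrix[i + 1]))
--     return asciiChars
-- ===== Notes on version B (the rewrite author's own statement) =====
-- stated objective: simpler
-- what changed: B steps over the rows two at a time with range(0, n, 2), building each output string in one join over the concatenated row pair, eliminating A's cross-iteration asciiChar accumulator and the i%2 flush flag.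
import Mathlib
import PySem

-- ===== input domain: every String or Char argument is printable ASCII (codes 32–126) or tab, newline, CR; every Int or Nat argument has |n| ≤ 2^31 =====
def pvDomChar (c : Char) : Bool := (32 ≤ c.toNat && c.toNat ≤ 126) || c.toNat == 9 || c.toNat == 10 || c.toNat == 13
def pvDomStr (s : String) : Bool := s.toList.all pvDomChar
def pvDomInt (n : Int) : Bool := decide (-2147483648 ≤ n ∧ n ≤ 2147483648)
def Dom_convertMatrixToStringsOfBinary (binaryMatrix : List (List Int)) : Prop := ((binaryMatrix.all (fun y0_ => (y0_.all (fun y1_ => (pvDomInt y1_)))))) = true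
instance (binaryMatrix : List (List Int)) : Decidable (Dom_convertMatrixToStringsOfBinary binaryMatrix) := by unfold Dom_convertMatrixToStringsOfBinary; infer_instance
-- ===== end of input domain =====

-- B steps over the rows two at a time, joining each concatenated row pair in one pass,
-- eliminating A's cross-iteration accumulator and the i%2 flush flag (objective: simpler).

-- ===== PORT A =====
-- A's while loop over index i, accessing binaryMatrix[i] sequentially: ported as
-- recursion over the remaining rows carrying the index i, the threaded asciiChar
-- accumulator and the output list, exactly as A threads them.
def pvALoop (i : Nat) (rows : List (List Int)) (asciiChar : String) (asciiChars : List String) : List String :=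
  match rows with
  | [] => asciiChars
  | r :: rest =>
    let asciiChar := r.foldl (fun s b => s ++ PySem.Int.toStr b) asciiChar
    if i % 2 == 1 then pvALoop (i + 1) rest "" (asciiChars ++ [asciiChar])
    else pvALoop (i + 1) rest asciiChar asciiChars

def convertMatrixToStringsOfBinary (binaryMatrix : List (List Int)) : List String :=
  if binaryMatrix.length % 2 ≠ 0 then []  -- Python raises here; excluded by Pre_
  else pvALoop 0 binaryMatrix "" []

-- ===== PORT B =====
-- B's for i in range(0, n, 2): ported as recursion consuming two rows per step;
-- ''.join(...) over the concatenated pair is String.intercalate "".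
def pvBLoop : List (List Int) → List String
  | r1 :: r2 :: rest =>
      PySem.Str.join "" ((r1 ++ r2).map PySem.Int.toStr) :: pvBLoop rest
  | _ => []

def convertMatrixToStringsOfBinary_alt (binaryMatrix : List (List Int)) : List String :=
  if binaryMatrix.length % 2 ≠ 0 then []  -- Python raises here; excluded by Pre_
  else pvBLoop binaryMatrix

-- ===== PRECONDITION & SPEC =====
-- A raises Exception on an odd number of rows; exactly those inputs are excluded.
def Pre_convertMatrixToStringsOfBinary (binaryMatrix : List (List Int)) : Prop :=
  binaryMatrix.length % 2 = 0
instance (binaryMatrix : List (List Int)) : Decidable (Pre_convertMatrixToStringsOfBinary binaryMatrix) := by unfold Pre_convertMatrixToStringsOfBinary; infer_instance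
def pvWitness_convertMatrixToStringsOfBinary : List (List Int) := [[1, 0], [1, 1]]

def Spec_convertMatrixToStringsOfBinary (binaryMatrix : List (List Int)) (out : List String) : Prop := out = convertMatrixToStringsOfBinary_alt binaryMatrix
instance (binaryMatrix : List (List Int)) (out : List String) : Decidable (Spec_convertMatrixToStringsOfBinary binaryMatrix out) := by unfold Spec_convertMatrixToStringsOfBinary; infer_instance

-- ===== CLAIM (what is proved, stated in full; the proofs are below) =====
def Claim_equal_convertMatrixToStringsOfBinary : Prop := ∀ (binaryMatrix : List (List Int)), Dom_convertMatrixToStringsOfBinary binaryMatrix → Pre_convertMatrixToStringsOfBinary binaryMatrix → Spec_convertMatrixToStringsOfBinary binaryMatrix (convertMatrixToStringsOfBinary binaryMatrix)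

-- ===== LEMMAS AND PROOFS =====
lemma join_empty_sep (l : List (List Char)) : PySem.Chars.join [] l = l.flatten := by
  match l with
  | [] => simp [PySem.Chars.join_nil]
  | [p] => simp [PySem.Chars.join_singleton]
  | p :: q :: rest =>
    rw [PySem.Chars.join_cons_cons, join_empty_sep (q :: rest)]
    simp

lemma foldl_toStr (l : List Int) (s : String) :
    l.foldl (fun a b => a ++ PySem.Int.toStr b) s = s ++ PySem.Str.join "" (l.map PySem.Int.toStr) := by
  induction l generalizing s with
  | nil => simp [PySem.Str.join]
  | cons x xs ih =>
    simp only [List.foldl_cons, List.map_cons, ih, PySem.Str.join]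
    apply String.toList_injective
    simp [join_empty_sep]

lemma join_split (r1 r2 : List String) :
    PySem.Str.join "" (r1 ++ r2) = PySem.Str.join "" r1 ++ PySem.Str.join "" r2 := by
  simp only [PySem.Str.join]
  apply String.toList_injective
  simp [join_empty_sep]

lemma pvALoop_even (rows : List (List Int)) (i : Nat) (hi : i % 2 = 0)
    (h : rows.length % 2 = 0) (out : List String) :
    pvALoop i rows "" out = out ++ pvBLoop rows := by
  match rows with
  | [] => simp [pvALoop, pvBLoop]
  | [r] => simp at h
  | r1 :: r2 :: rest =>
    have h' : rest.length % 2 = 0 := by simp at h; omega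
    have hi1 : (i + 1) % 2 = 1 := by omega
    have hi2 : (i + 2) % 2 = 0 := by omega
    simp only [pvALoop, hi, hi1]
    norm_num
    rw [pvALoop_even rest (i + 2) hi2 h']
    simp [pvBLoop, foldl_toStr, join_split]

-- ===== VERDICT (by name: the statement is the Claim_ definition above) =====
theorem convertMatrixToStringsOfBinary_spec : Claim_equal_convertMatrixToStringsOfBinary := by
  intro m _ hpre
  unfold Spec_convertMatrixToStringsOfBinary convertMatrixToStringsOfBinary convertMatrixToStringsOfBinary_alt
  have h : m.length % 2 = 0 := hpre
  simp only [h]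
  simpa using pvALoop_even m 0 rfl h []
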